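-- pv_equiv track=rewrite | github.com/MihaFedo/Algorithms_and_data_structures | sprint_11/final/f_11_1.py | dist_between_zero
-- ===== SOURCE A (Python) =====
-- import math
--
-- def dist_between_zero(count: int) -> list:
--     center = math.ceil((count-1)/2)
--     dist_between_zero = []
--     for i in range(count):
--         if i < center:
--             dist_between_zero.append(i)
--         elif i == center:
--             dist_between_zero.append(center)
--         else:
--             dist_between_zero.append(count-i)
--     return dist_between_zero
-- ===== SOURCE B (Python) =====
-- def dist_between_zero(count: int) -> list:
--     # mirror construction: build the ascending left half once, reflect it for the right half
--     if count <= 0: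
--         return []
--     left = list(range(count // 2 + 1))
--     return left + left[1:(count + 1) // 2][::-1]
-- ===== Notes on version B (the rewrite author's own statement) =====
-- stated objective: alternative
-- what changed: B replaces the per-index three-way branch over the whole range by a mirror construction: it builds only the ascending left half with range() and produces the right half by reversing a prefix slice of that half, exploiting the palindrome symmetry f(i)=f(count-i).
import Mathlib
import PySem

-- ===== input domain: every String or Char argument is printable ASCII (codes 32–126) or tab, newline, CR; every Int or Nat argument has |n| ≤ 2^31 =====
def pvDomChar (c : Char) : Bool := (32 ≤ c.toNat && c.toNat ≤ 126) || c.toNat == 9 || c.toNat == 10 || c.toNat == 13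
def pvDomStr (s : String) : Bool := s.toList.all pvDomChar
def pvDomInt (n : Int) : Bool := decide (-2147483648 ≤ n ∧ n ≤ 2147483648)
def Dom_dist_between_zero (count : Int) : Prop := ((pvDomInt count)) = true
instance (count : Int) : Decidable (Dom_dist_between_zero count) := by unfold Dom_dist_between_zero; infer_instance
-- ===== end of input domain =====

-- B builds the ascending left half with range() and mirrors a reversed prefix slice for the right half, instead of A's per-index three-way branch; alternative algorithm, same cost.


-- ===== PORT A =====
def dist_between_zero (count : Int) : List Int :=
  -- math.ceil((count-1)/2) is exact on this integer domain: ceil(a/2) = -((-a) // 2)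
  let center : Int := -(PySem.Int.floordiv (-(count - 1)) 2)
  (PySem.List.pyRange 0 count 1).foldl
    (fun acc i =>
      if i < center then acc ++ [i]
      else if i = center then acc ++ [center]
      else acc ++ [count - i]) []

-- ===== PORT B =====
def dist_between_zero_alt (count : Int) : List Int :=
  if count ≤ 0 then []
  else
    let left := PySem.List.pyRange 0 (PySem.Int.floordiv count 2 + 1) 1
    left ++ (PySem.List.slice left (some 1) (some (PySem.Int.floordiv (count + 1) 2))).reverse

-- ===== PRECONDITION & SPEC =====
def Spec_dist_between_zero (count : Int) (out : List Int) : Prop := out = dist_between_zero_alt count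
instance (count : Int) (out : List Int) : Decidable (Spec_dist_between_zero count out) := by unfold Spec_dist_between_zero; infer_instance

-- ===== CLAIM (what is proved, stated in full; the proofs are below) =====
def Claim_equal_dist_between_zero : Prop := ∀ (count : Int), Dom_dist_between_zero count → Spec_dist_between_zero count (dist_between_zero count)

-- ===== LEMMAS AND PROOFS =====

theorem dbz_map_sub (a b c : Int) :
    (PySem.List.pyRange a b 1).map (fun i => c - i)
      = (List.range (b - a).toNat).map (fun j : Nat => (c - a) - j) := by
  rw [PySem.List.pyRange_one, List.map_map]
  apply List.map_congr_left
  intro x _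
  simp [Function.comp]
  omega

-- ===== VERDICT (by name: the statement is the Claim_ definition above) =====
theorem dist_between_zero_spec : Claim_equal_dist_between_zero := by
  intro count _
  unfold Spec_dist_between_zero dist_between_zero dist_between_zero_alt
  by_cases hle : count ≤ 0
  · simp [hle, PySem.List.pyRange_one_eq_nil hle]
  · simp only [if_neg hle]
    rw [PySem.Int.floordiv_eq_ediv_of_pos (a := -(count - 1)) (by norm_num),
        PySem.Int.floordiv_eq_ediv_of_pos (a := count) (by norm_num),
        PySem.Int.floordiv_eq_ediv_of_pos (a := count + 1) (by norm_num)]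
    set c : Int := -(-(count - 1) / 2) with hc
    set k : Int := (count + 1) / 2 with hk
    have hce : c = count / 2 := by omega
    have hkb : 1 ≤ k ∧ k ≤ c + 1 ∧ count - (c + 1) = k - 1 ∧ 0 ≤ c ∧ c + 1 ≤ count + 1 := by
      constructor
      · omega
      · constructor
        · omega
        · constructor
          · omega
          · constructor <;> omega
    obtain ⟨h1k, hkc, hck, h0c, hcc⟩ := hkb
    rw [show count / 2 + 1 = c + 1 from by omega]
    -- the loop body is an append of a single element
    have hbody : (fun (acc : List Int) (i : Int) =>
        if i < c then acc ++ [i]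
        else if i = c then acc ++ [c]
        else acc ++ [count - i])
      = (fun acc i => acc ++ [if i < c then i else if i = c then c else count - i]) := by
      funext acc i
      split_ifs <;> rfl
    rw [hbody, PySem.List.foldl_append_singleton_eq_map, List.nil_append]
    -- split the range at c+1
    rw [PySem.List.pyRange_one_append 0 (c + 1) count (by omega) (by omega), List.map_append]
    congr 1
    · -- left part: f is the identity there
      rw [List.map_congr_left (f := fun i => if i < c then i else if i = c then c else count - i)
        (g := id) ?_, List.map_id]
      intro i hi
      rw [PySem.List.mem_pyRange_one] at hi
      by_cases h : i < c
      · simp [h]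
      · have : i = c := by omega
        simp [this]
    · -- right part equals the reversed slice
      rw [List.map_congr_left (f := fun i => if i < c then i else if i = c then c else count - i)
        (g := fun i => count - i) ?_]
      · -- slice left 1 k = pyRange 1 k 1
        have hsl : PySem.List.slice (PySem.List.pyRange 0 (c + 1) 1) (some 1) (some k)
            = PySem.List.pyRange 1 k 1 := by
          rw [PySem.List.slice_toNat _ (by norm_num) (by omega)]
          rw [PySem.List.pyRange_one_cons (by omega)]
          simp only [Int.toNat_one, List.drop_one, List.tail_cons, zero_add]
          rw [PySem.List.pyRange_one_append 1 k (c + 1) h1k hkc]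
          have hlen : (PySem.List.pyRange 1 k 1).length = k.toNat - 1 := by
            rw [PySem.List.length_pyRange_one]; omega
          rw [← hlen, List.take_left]
        rw [hsl]
        have hrev : (PySem.List.pyRange 1 k 1).reverse = PySem.List.pyRange (k - 1) 0 (-1) := by
          rw [PySem.List.pyRange_neg_one_eq_reverse]
          norm_num
        rw [hrev, PySem.List.pyRange_neg_one, dbz_map_sub]
        have : (count - (c + 1)).toNat = (k - 1 - 0).toNat := by omega
        rw [this]
        apply List.map_congr_left
        intro x _
        omega
      · intro i hi
        rw [PySem.List.mem_pyRange_one] at hi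
        have h1 : ¬ i < c := by omega
        have h2 : ¬ i = c := by omega
        simp [h1, h2]
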